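-- pv_equiv track=rewrite | github.com/jokh0108/study-algorithm | test/estsoft/4 2.py | solution
-- ===== SOURCE A (Python) =====
-- import collections
--
-- def solution(S, C):
--     S = S.split('; ')
--     s = [x.lower() for x in S]
--     ss = [x.split() for x in s]
--     c = C.lower()
--     d = collections.defaultdict(int)
--     email_name = ["_".join(["".join(x[-1].split('-')), x[0]]) for x in ss]
--     counter = collections.Counter(email_name)
--     for i in range(len(email_name)-1, -1, -1):
--         full = email_name[i]
--         if counter[email_name[i]] > 1:
--             full += str(counter[email_name[i]])
--             counter[email_name[i]] -= 1
--         email_name[i] = S[i] + " <" + full + "@" + c + ".com>"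
--     return "; ".join(email_name)
-- ===== SOURCE B (Python) =====
-- def solution(S, C):
--     parts = S.split('; ')
--     c = C.lower()
--     seen = {}
--     out = []
--     for part in parts:
--         w = part.lower().split()
--         p = "_".join(["".join(w[-1].split('-')), w[0]])
--         seen[p] = seen.get(p, 0) + 1
--         j = seen[p]
--         full = p + str(j) if j > 1 else p
--         out.append(part + " <" + full + "@" + c + ".com>")
--     return "; ".join(out)
-- ===== Notes on version B (the rewrite author's own statement) =====
-- stated objective: simpler
-- what changed: A builds the prefix list, a full Counter, then walks indices backwards decrementing counts and mutating the list in place; B is a single forward pass with a seen-count dict (suffix = 1-based occurrence index when >1), appending results in order with no Counter, no index arithmetic and no in-place mutation.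
import Mathlib
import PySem

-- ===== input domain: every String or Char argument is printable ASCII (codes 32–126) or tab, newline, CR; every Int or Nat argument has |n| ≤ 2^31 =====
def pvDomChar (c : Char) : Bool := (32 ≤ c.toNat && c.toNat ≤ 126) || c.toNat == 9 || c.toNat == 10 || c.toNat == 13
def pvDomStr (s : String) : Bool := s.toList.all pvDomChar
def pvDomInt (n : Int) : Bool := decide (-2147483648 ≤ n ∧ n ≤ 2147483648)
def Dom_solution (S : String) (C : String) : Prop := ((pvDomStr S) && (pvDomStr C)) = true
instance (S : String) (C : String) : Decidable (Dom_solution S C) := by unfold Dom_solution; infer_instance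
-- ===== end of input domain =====

-- B replaces A's Counter + backward index loop (with in-place list mutation) by one forward
-- pass keeping a seen-count dict and appending results in order; objective: simpler.


-- ===== PORT A =====
-- Note: 's.split(sep)' with the nonempty literal separators "; " and "-" never raises,
-- so '(PySem.Str.split? _ sep).getD []' is exact (split? is 'some' whenever sep ≠ "").
-- body of A's backward loop: state = (email_name, counter), i the current index
def pvStepA (Sp : List String) (c : String) (st : List String × PySem.Dict String Int) (i : Int) :
    List String × PySem.Dict String Int :=
  let full0 := PySem.List.pyGetD st.1 i ""   -- full = email_name[i]  (i in range along A's loop)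
  if st.2.getD full0 0 > 1 then
    (PySem.List.pySetD st.1 i
       (PySem.List.pyGetD Sp i "" ++ " <" ++ (full0 ++ PySem.Int.toStr (st.2.getD full0 0)) ++ "@" ++ c ++ ".com>"),
     st.2.modify full0 0 (· - 1))
  else
    (PySem.List.pySetD st.1 i
       (PySem.List.pyGetD Sp i "" ++ " <" ++ full0 ++ "@" ++ c ++ ".com>"),
     st.2)

def solution (S : String) (C : String) : String :=
  let Sp := (PySem.Str.split? S "; ").getD []
  let s := Sp.map PySem.Str.lower
  let ss := s.map PySem.Str.split₀
  let c := PySem.Str.lower C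
  -- x[-1] / x[0] raise on an empty word list; excluded by Pre_, default "" never read there
  let email0 := ss.map (fun x =>
    PySem.Str.join "_" [PySem.Str.join "" (((PySem.Str.split? (PySem.List.pyGetD x (-1) "") "-").getD [])),
                        PySem.List.pyGetD x 0 ""])
  let counter := PySem.Dict.counter email0
  let final := (PySem.List.pyRange ((email0.length : Int) - 1) (-1) (-1)).foldl (pvStepA Sp c) (email0, counter)
  PySem.Str.join "; " final.1

-- ===== PORT B =====
-- prefix of one display name: "_".join(["".join(w[-1].split('-')), w[0]]) of the lowered words
def pvPrefix (part : String) : String :=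
  let w := PySem.Str.split₀ (PySem.Str.lower part)
  PySem.Str.join "_" [PySem.Str.join "" (((PySem.Str.split? (PySem.List.pyGetD w (-1) "") "-").getD [])),
                      PySem.List.pyGetD w 0 ""]

-- body of B's forward loop: state = (seen, out)
def pvStepB (c : String) (st : PySem.Dict String Int × List String) (part : String) :
    PySem.Dict String Int × List String :=
  let p := pvPrefix part
  let seen := st.1.modify p 0 (· + 1)     -- seen[p] = seen.get(p, 0) + 1
  let j := seen.getD p 0
  let full := if j > 1 then p ++ PySem.Int.toStr j else p
  (seen, st.2 ++ [part ++ " <" ++ full ++ "@" ++ c ++ ".com>"])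

def solution_alt (S : String) (C : String) : String :=
  let parts := (PySem.Str.split? S "; ").getD []
  let c := PySem.Str.lower C
  PySem.Str.join "; " (parts.foldl (pvStepB c) (PySem.Dict.empty, [])).2

-- ===== PRECONDITION & SPEC =====
-- Pre_ excludes exactly the inputs where Python A raises IndexError: some '; '-separated part
-- whose (lowered) whitespace split is empty (the part is empty or all whitespace).
def Pre_solution (S : String) (C : String) : Prop :=
  ∀ part ∈ (PySem.Str.split? S "; ").getD [], PySem.Str.split₀ (PySem.Str.lower part) ≠ []
instance (S : String) (C : String) : Decidable (Pre_solution S C) := by unfold Pre_solution; infer_instance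

def pvWitness_solution : String × String := ("John Doe; Jane Doe-Ray; John Doe", "ExampleCo")

def Spec_solution (S : String) (C : String) (out : String) : Prop := out = solution_alt S C
instance (S : String) (C : String) (out : String) : Decidable (Spec_solution S C out) := by unfold Spec_solution; infer_instance

-- ===== CLAIM (what is proved, stated in full; the proofs are below) =====
def Claim_equal_solution : Prop := ∀ (S : String) (C : String), Dom_solution S C → Pre_solution S C → Spec_solution S C (solution S C)

-- ===== LEMMAS AND PROOFS =====

-- the common specification: formatted entry (j = 1-based occurrence index of the prefix) and
-- the list of entries, occurrence counts taken over the already-processed parts q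
def pvFmt (c part p : String) (j : Int) : String :=
  part ++ " <" ++ (if j > 1 then p ++ PySem.Int.toStr j else p) ++ "@" ++ c ++ ".com>"

def pvCanon (c : String) (q l : List String) : List String :=
  match l with
  | [] => []
  | x :: t =>
      pvFmt c x (pvPrefix x) (((q.map pvPrefix).count (pvPrefix x) : Int) + 1) :: pvCanon c (q ++ [x]) t

lemma pvCanon_append (c : String) (q l1 l2 : List String) :
    pvCanon c q (l1 ++ l2) = pvCanon c q l1 ++ pvCanon c (q ++ l1) l2 := by
  induction l1 generalizing q with
  | nil => simp [pvCanon]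
  | cons x t ih => simp [pvCanon, ih, List.append_assoc]

-- B's loop computes pvCanon
lemma loopB (c : String) (l q : List String) (seen : PySem.Dict String Int) (out : List String)
    (h : ∀ p, seen.getD p 0 = ((q.map pvPrefix).count p : Int)) :
    (l.foldl (pvStepB c) (seen, out)).2 = out ++ pvCanon c q l := by
  induction l generalizing q seen out with
  | nil => simp [pvCanon]
  | cons x t ih =>
    have hj : (seen.modify (pvPrefix x) 0 (· + 1)).getD (pvPrefix x) 0
        = ((q.map pvPrefix).count (pvPrefix x) : Int) + 1 := by
      rw [PySem.Dict.getD_modify_self, h]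
    have hstep : pvStepB c (seen, out) x
        = (seen.modify (pvPrefix x) 0 (· + 1),
           out ++ [pvFmt c x (pvPrefix x) (((q.map pvPrefix).count (pvPrefix x) : Int) + 1)]) := by
      simp only [pvStepB, pvFmt, hj]
    rw [List.foldl_cons, hstep,
        ih (q ++ [x]) _ _ (by
          intro p
          rw [PySem.Dict.getD_modify]
          by_cases hp : p = pvPrefix x
          · simp [hp, h, List.count_append]
          · simp [hp, h p, List.count_append, Ne.symm hp])]
    simp [pvCanon]

-- A's loop computes pvCanon
lemma loopA (Sp : List String) (c : String) (k : Nat) (hk : k ≤ Sp.length)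
    (tail : List String) (ctr : PySem.Dict String Int)
    (hinv : ∀ p, ctr.getD p 0 =
      (if 0 < ((Sp.map pvPrefix).take k).count p then (((Sp.map pvPrefix).take k).count p : Int)
       else if 0 < (Sp.map pvPrefix).count p then 1 else 0)) :
    ((PySem.List.pyRange ((k : Int) - 1) (-1) (-1)).foldl (pvStepA Sp c)
        ((Sp.map pvPrefix).take k ++ tail, ctr)).1
      = pvCanon c [] (Sp.take k) ++ tail := by
  induction k generalizing tail ctr with
  | zero =>
    rw [show ((0 : Nat) : Int) - 1 = -1 by norm_num, PySem.List.pyRange_neg_one_eq_nil le_rfl]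
    simp [pvCanon]
  | succ k ih =>
    have hk1 : k < Sp.length := by omega
    have hkp : k < (Sp.map pvPrefix).length := by simpa using hk1
    have hlen : ((Sp.map pvPrefix).take k).length = k := by simp; omega
    have hrange : PySem.List.pyRange (((k + 1 : Nat) : Int) - 1) (-1) (-1)
        = ((k : Nat) : Int) :: PySem.List.pyRange (((k : Nat) : Int) - 1) (-1) (-1) := by
      rw [show (((k + 1 : Nat) : Int) - 1) = ((k : Nat) : Int) by push_cast; ring,
          PySem.List.pyRange_neg_one_cons (by omega)]
    have htake : (Sp.map pvPrefix).take (k + 1)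
        = (Sp.map pvPrefix).take k ++ [(Sp.map pvPrefix)[k]] := by
      rw [List.take_add_one]; simp [List.getElem?_eq_getElem hkp]
    have hcnt1 : ((Sp.map pvPrefix).take (k + 1)).count (Sp.map pvPrefix)[k]
        = ((Sp.map pvPrefix).take k).count (Sp.map pvPrefix)[k] + 1 := by
      rw [htake]; simp [List.count_append]
    have hget : PySem.List.pyGetD ((Sp.map pvPrefix).take (k + 1) ++ tail) ((k : Nat) : Int) ""
        = (Sp.map pvPrefix)[k] := by
      rw [PySem.List.pyGetD_natCast, htake, List.append_assoc, List.getD,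
          List.getElem?_append_right (by omega)]
      simp [hlen]
    have hgetS : PySem.List.pyGetD Sp ((k : Nat) : Int) "" = Sp[k] := by
      rw [PySem.List.pyGetD_natCast, List.getD, List.getElem?_eq_getElem hk1]; rfl
    have hv : ctr.getD (Sp.map pvPrefix)[k] 0
        = (((Sp.map pvPrefix).take k).count (Sp.map pvPrefix)[k] : Int) + 1 := by
      rw [hinv, if_pos (by omega), hcnt1]; push_cast; ring
    have hset : ∀ w : String,
        PySem.List.pySetD ((Sp.map pvPrefix).take (k + 1) ++ tail) ((k : Nat) : Int) w
        = (Sp.map pvPrefix).take k ++ w :: tail := by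
      intro w
      rw [PySem.List.pySetD_natCast, htake, List.append_assoc,
          List.set_append_right _ _ (by omega)]
      simp [hlen]
    have hmem : (Sp.map pvPrefix)[k] ∈ Sp.map pvPrefix := List.getElem_mem hkp
    have hstep : pvStepA Sp c ((Sp.map pvPrefix).take (k + 1) ++ tail, ctr) ((k : Nat) : Int)
        = ((Sp.map pvPrefix).take k ++
             pvFmt c Sp[k] (Sp.map pvPrefix)[k]
               ((((Sp.map pvPrefix).take k).count (Sp.map pvPrefix)[k] : Int) + 1) :: tail,
           if 0 < ((Sp.map pvPrefix).take k).count (Sp.map pvPrefix)[k]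
             then ctr.modify (Sp.map pvPrefix)[k] 0 (· - 1) else ctr) := by
      by_cases hc : 0 < ((Sp.map pvPrefix).take k).count (Sp.map pvPrefix)[k]
      · have hgt : ((((Sp.map pvPrefix).take k).count (Sp.map pvPrefix)[k] : Int) + 1) > 1 := by
          omega
        simp only [pvStepA, hget, hgetS, hv, hset, pvFmt, if_pos hc, if_pos hgt]
      · have h2 : ¬ (((((Sp.map pvPrefix).take k).count (Sp.map pvPrefix)[k] : Int) + 1) > 1) := by
          omega
        simp only [pvStepA, hget, hgetS, hv, hset, pvFmt, if_neg h2, if_neg hc]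
    rw [hrange, List.foldl_cons, hstep,
        ih (by omega) _ _ (by
          intro p
          by_cases hp : p = (Sp.map pvPrefix)[k]
          · subst hp
            by_cases hc : 0 < ((Sp.map pvPrefix).take k).count (Sp.map pvPrefix)[k]
            · rw [if_pos hc, PySem.Dict.getD_modify_self, hv, if_pos hc]; omega
            · have h0 : ((Sp.map pvPrefix).take k).count (Sp.map pvPrefix)[k] = 0 := by omega
              rw [if_neg hc, hv, h0, if_neg (by omega),
                  if_pos (List.count_pos_iff.mpr hmem)]
              norm_num
          · have hcount : ((Sp.map pvPrefix).take (k + 1)).count p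
                = ((Sp.map pvPrefix).take k).count p := by
              have hp' : ¬ pvPrefix Sp[k] = p := by
                simp only [List.getElem_map] at hp; exact fun h => hp h.symm
              rw [htake]; simp [List.count_append, hp']
            have hrest : (if 0 < ((Sp.map pvPrefix).take k).count (Sp.map pvPrefix)[k]
                then ctr.modify (Sp.map pvPrefix)[k] 0 (· - 1) else ctr).getD p 0
                = ctr.getD p 0 := by
              split
              · rw [PySem.Dict.getD_modify, if_neg hp]
              · rfl
            rw [hrest, hinv, hcount])]
    have htakeS : Sp.take (k + 1) = Sp.take k ++ [Sp[k]] := by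
      rw [List.take_add_one]; simp [List.getElem?_eq_getElem hk1]
    rw [htakeS, pvCanon_append]
    simp [pvCanon, List.map_take, List.getElem_map]

-- ===== VERDICT (by name: the statement is the Claim_ definition above) =====
theorem solution_spec : Claim_equal_solution := by
  intro S C _hdom _hpre
  unfold Spec_solution solution solution_alt
  have hmail : (((((PySem.Str.split? S "; ").getD []).map PySem.Str.lower).map PySem.Str.split₀).map
      (fun x => PySem.Str.join "_"
        [PySem.Str.join "" (((PySem.Str.split? (PySem.List.pyGetD x (-1) "") "-").getD [])),
         PySem.List.pyGetD x 0 ""]))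
      = ((PySem.Str.split? S "; ").getD []).map pvPrefix := by
    simp only [List.map_map]; rfl
  have hlen2 : (((PySem.Str.split? S "; ").getD []).map pvPrefix).length
      = ((PySem.Str.split? S "; ").getD []).length := by simp
  have hinv : ∀ p, (PySem.Dict.counter (((PySem.Str.split? S "; ").getD []).map pvPrefix)).getD p 0
      = (if 0 < ((((PySem.Str.split? S "; ").getD []).map pvPrefix).take
            (((PySem.Str.split? S "; ").getD []).map pvPrefix).length).count p
         then (((((PySem.Str.split? S "; ").getD []).map pvPrefix).take
            (((PySem.Str.split? S "; ").getD []).map pvPrefix).length).count p : Int)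
         else if 0 < (((PySem.Str.split? S "; ").getD []).map pvPrefix).count p then 1 else 0) := by
    intro p
    rw [PySem.Dict.getD_counter, List.take_length]
    rcases Nat.eq_zero_or_pos ((((PySem.Str.split? S "; ").getD []).map pvPrefix).count p) with h | h
    · simp [h]
    · rw [if_pos h]
  have hA := loopA ((PySem.Str.split? S "; ").getD []) (PySem.Str.lower C)
      (((PySem.Str.split? S "; ").getD []).map pvPrefix).length (le_of_eq hlen2) []
      (PySem.Dict.counter (((PySem.Str.split? S "; ").getD []).map pvPrefix)) hinv
  rw [List.take_length, List.append_nil] at hA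
  have hB := loopB (PySem.Str.lower C) ((PySem.Str.split? S "; ").getD []) []
      PySem.Dict.empty [] (by intro p; simp [PySem.Dict.getD, PySem.Dict.empty, PySem.Dict.get?])
  simp only [hmail]
  rw [hA, hB, hlen2, List.take_length]
  simp
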